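-- pv_equiv track=rewrite | github.com/Minh20812/YTTM_Tool | src/subtitle/spaceSrt_cleaner.py | clean_srt_content
-- ===== SOURCE A (Python) =====
-- def clean_srt_content(content):
--     """
--     Thêm ♪ vào tất cả các dòng trống/khoảng trắng,
--     trừ dòng trống phân cách giữa các block phụ đề (dòng trống đứng trước số thứ tự block mới).
--     Đảm bảo giữa các block chỉ có một dòng trống.
--     """
--     lines = content.split('\n')
--     cleaned_lines = []
--     prev_line_is_block_sep = False
--
--     for idx, line in enumerate(lines):
--         # Kiểm tra nếu dòng hiện tại là dòng trống/khoảng trắng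
--         if line.strip() == '':
--             # Kiểm tra dòng tiếp theo có phải là số thứ tự block (chỉ chứa số) không
--             next_line = lines[idx + 1] if idx + 1 < len(lines) else ''
--             if next_line.strip().isdigit():
--                 # Đây là dòng trống phân cách block, giữ nguyên (không thêm ♪)
--                 cleaned_lines.append('')
--                 prev_line_is_block_sep = True
--             else:
--                 # Không phải dòng phân cách block, thay bằng ♪
--                 cleaned_lines.append('♪')
--                 prev_line_is_block_sep = False
--         else:
--             cleaned_lines.append(line)
--             prev_line_is_block_sep = False
--
--     return '\n'.join(cleaned_lines)
-- ===== SOURCE B (Python) =====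
-- def clean_srt_content(content):
--     """
--     Thêm ♪ vào tất cả các dòng trống/khoảng trắng,
--     trừ dòng trống phân cách giữa các block phụ đề.
--     Reverse pass threading a 'next line is a digit line' flag instead of
--     forward indexing into the list.
--     """
--     out = []
--     next_is_digit = False
--     for line in reversed(content.split('\n')):
--         if line.strip() == '':
--             out.append('' if next_is_digit else '♪')
--         else:
--             out.append(line)
--         next_is_digit = line.strip().isdigit()
--     out.reverse()
--     return '\n'.join(out)
-- ===== Notes on version B (the rewrite author's own statement) =====
-- stated objective: alternative
-- what changed: Replaces forward indexing lines[idx+1] inside an enumerate loop by a single reverse pass that threads a next-line-is-digit boolean, collecting output in reverse and reversing once at the end.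
import Mathlib
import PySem

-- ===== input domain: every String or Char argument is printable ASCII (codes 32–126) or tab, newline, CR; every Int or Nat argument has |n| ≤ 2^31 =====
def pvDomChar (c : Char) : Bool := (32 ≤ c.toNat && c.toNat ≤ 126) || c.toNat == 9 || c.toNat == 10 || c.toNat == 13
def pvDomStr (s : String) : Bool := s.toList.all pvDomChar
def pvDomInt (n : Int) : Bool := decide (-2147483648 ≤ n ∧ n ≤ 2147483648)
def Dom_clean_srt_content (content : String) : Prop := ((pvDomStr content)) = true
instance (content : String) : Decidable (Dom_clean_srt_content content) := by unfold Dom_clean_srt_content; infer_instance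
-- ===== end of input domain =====

-- B changes the decomposition: a reverse pass threading a boolean instead of forward indexing; same cost (objective: alternative).

-- ===== PORT A =====
-- A's loop body: state = (prev_line_is_block_sep, cleaned_lines); `lines` is the full split list (for lines[idx+1])
def pvStepA (lines : List String) (st : Bool × List String) (p : Int × String) : Bool × List String :=
  if PySem.Str.strip p.2 == "" then
    let next_line := if p.1 + 1 < (lines.length : Int) then PySem.List.pyGetD lines (p.1 + 1) "" else ""
    if PySem.Str.strIsdigit (PySem.Str.strip next_line) then (true, st.2 ++ [""])
    else (false, st.2 ++ ["♪"])
  else (false, st.2 ++ [p.2])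

def clean_srt_content (content : String) : String :=
  let lines := (PySem.Str.split? content "\n").getD []  -- split? is none only for sep = ""; here sep = "\n"
  PySem.Str.join "\n" ((PySem.List.enumerate lines 0).foldl (pvStepA lines) (false, [])).2

-- ===== PORT B =====
-- B's loop body: state = (next_is_digit, out in reverse emission order)
def pvStepB (st : Bool × List String) (line : String) : Bool × List String :=
  let out' := st.2 ++ [if PySem.Str.strip line == "" then (if st.1 then "" else "♪") else line]
  (PySem.Str.strIsdigit (PySem.Str.strip line), out')

def clean_srt_content_alt (content : String) : String :=
  let r := ((PySem.Str.split? content "\n").getD []).reverse.foldl pvStepB (false, [])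
  PySem.Str.join "\n" r.2.reverse

-- ===== PRECONDITION & SPEC =====
def Spec_clean_srt_content (content : String) (out : String) : Prop := out = clean_srt_content_alt content
instance (content : String) (out : String) : Decidable (Spec_clean_srt_content content out) := by unfold Spec_clean_srt_content; infer_instance

-- ===== CLAIM (what is proved, stated in full; the proofs are below) =====
def Claim_equal_clean_srt_content : Prop := ∀ (content : String), Dom_clean_srt_content content → Spec_clean_srt_content content (clean_srt_content content)

-- ===== LEMMAS AND PROOFS =====

-- `nd rest` = "the line after the current one strips to a digit string" (false past the end)
def pvNd : List String → Bool
  | [] => false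
  | y :: _ => PySem.Str.strIsdigit (PySem.Str.strip y)

-- the common specification of the produced line list
def pvG : List String → List String
  | [] => []
  | x :: rest =>
      (if PySem.Str.strip x == "" then (if pvNd rest then "" else "♪") else x) :: pvG rest

theorem pvFoldB (ls : List String) :
    ls.reverse.foldl pvStepB (false, []) = (pvNd ls, (pvG ls).reverse) := by
  induction ls with
  | nil => rfl
  | cons x rest ih =>
      simp only [List.reverse_cons, List.foldl_append, ih]
      simp only [pvG, pvNd]
      split_ifs <;> simp_all [pvStepB]

theorem pvFoldA (suf : List String) : ∀ (pre : List String) (flag : Bool) (acc : List String),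
    ((PySem.List.enumerate suf (pre.length : Int)).foldl (pvStepA (pre ++ suf)) (flag, acc)).2
      = acc ++ pvG suf := by
  induction suf with
  | nil => intro pre flag acc; simp [PySem.List.enumerate, pvG]
  | cons x rest ih =>
      intro pre flag acc
      rw [PySem.List.enumerate_cons, List.foldl_cons]
      have hrec : ∀ st : Bool × List String,
          ((PySem.List.enumerate rest ((pre.length : Int) + 1)).foldl (pvStepA (pre ++ x :: rest)) st).2
            = st.2 ++ pvG rest := by
        intro st
        have h1 : ((pre.length : Int) + 1) = (((pre ++ [x]).length : Nat) : Int) := by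
          simp
        have h2 : pre ++ x :: rest = (pre ++ [x]) ++ rest := by simp
        rw [h1, h2]
        have := ih (pre ++ [x]) st.1 st.2
        simpa using this
      rw [hrec]
      cases rest with
      | nil =>
          have hguard : ¬ ((pre.length : Int) + 1 < ((pre ++ [x]).length : Int)) := by
            simp
          have hdig : PySem.Str.strIsdigit (PySem.Str.strip "") = false := by decide
          simp only [pvStepA, if_neg hguard, hdig, pvG, pvNd]
          split_ifs <;> simp
      | cons y r =>
          have hguard : (pre.length : Int) + 1 < ((pre ++ x :: y :: r).length : Int) := by
            simp
          have hget : PySem.List.pyGetD (pre ++ x :: y :: r) ((pre.length : Int) + 1) "" = y := by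
            have h1 : ((pre.length : Int) + 1) = ((pre.length + 1 : Nat) : Int) := by push_cast; ring
            rw [h1, PySem.List.pyGetD_natCast]
            simp [List.getD]
          simp only [pvStepA, if_pos hguard, hget, pvG, pvNd]
          split_ifs <;> simp

theorem clean_srt_content_eq (content : String) :
    clean_srt_content content = clean_srt_content_alt content := by
  unfold clean_srt_content clean_srt_content_alt
  rw [pvFoldB]
  have h := pvFoldA ((PySem.Str.split? content "\n").getD []) [] false []
  simp only [List.length_nil, Nat.cast_zero, List.nil_append] at h
  simp [h]

-- ===== VERDICT (by name: the statement is the Claim_ definition above) =====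
theorem clean_srt_content_spec : Claim_equal_clean_srt_content := by
  intro content _
  unfold Spec_clean_srt_content
  exact clean_srt_content_eq content
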